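-- pv_equiv track=rewrite | github.com/CameronDeweerd/Advent2020 | 11-2.py | seatCheck
-- ===== SOURCE A (Python) =====
-- def seatCheck(layout):
--     toSwitch = []
--     for x in range(len(layout)):
--         for y in range(len(layout[0])):
--             if layout[x][y] == 'L' and countAdjacent(layout, x, y) == 0:
--                 toSwitch.append((x, y))
--             elif layout[x][y] == '#' and countAdjacent(layout, x, y) >= 5:
--                 toSwitch.append((x, y))
--     return toSwitch
--
-- def countAdjacent (layout, x, y):
--     filled = 0
--     for xOffset, yOffset in ([-1, -1], [-1, 0], [-1, 1], [0, -1], [0, 1], [1, -1], [1, 0], [1, 1]):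
--         i=1
--         while True:
--             try:
--                 if x + i*xOffset < 0 or y + i*yOffset < 0:
--                     break
--                 elif layout[x + i*xOffset][y + i*yOffset] == "#":
--                     filled += 1
--                     break
--                 elif layout[x + i * xOffset][y + i * yOffset] == "L":
--                     break
--             except IndexError:
--                 break
--             i += 1
--     return filled
-- ===== SOURCE B (Python) =====
-- def seatCheck(layout):
--     # Directional sweep DP: for each of the 8 directions, one linear pass computes
--     # for every cell whether the nearest visible seat in that direction is occupied.
--     h = len(layout)
--     if h == 0:
--         return []
--     w = len(layout[0])
--     rows = [list(r) for r in layout]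
--     W = max(len(r) for r in rows)
--
--     def combine(c, inherited):
--         # nearest visible seat is filled, given the adjacent cell's char and its own answer
--         return c == '#' or (c != 'L' and inherited)
--
--     def scan_left(chars):
--         # direction (0,-1): vis[y] = nearest seat strictly left of y is '#'
--         vis, last = [], False
--         for c in chars:
--             vis.append(last)
--             last = combine(c, last)
--         return vis
--
--     def shift_vis(prev_chars, prev_vis, dy):
--         # one DP step: this row's answer from the already-final adjacent row
--         out = []
--         for y in range(W):
--             ny = y + dy
--             out.append(combine(prev_chars[ny], prev_vis[ny]) if 0 <= ny < len(prev_chars) else False)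
--         return out
--
--     def up_sweep(rs, dy):
--         # direction (-1,dy): process rows top to bottom, each row from the previous one
--         grid, prev = [], None
--         for chars in rs:
--             vis = [False] * W if prev is None else shift_vis(prev[0], prev[1], dy)
--             grid.append(vis)
--             prev = (chars, vis)
--         return grid
--
--     rows_v = rows[::-1]  # vertical flip: dx=1 becomes dx=-1
--
--     grids = [
--         up_sweep(rows, -1), up_sweep(rows, 0), up_sweep(rows, 1),    # (-1,-1) (-1,0) (-1,1)
--         [scan_left(r) for r in rows],                                # (0,-1)
--         [scan_left(r[::-1])[::-1] for r in rows],                    # (0,1)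
--         up_sweep(rows_v, -1)[::-1], up_sweep(rows_v, 0)[::-1], up_sweep(rows_v, 1)[::-1],  # (1,*)
--     ]
--
--     out = []
--     for x in range(h):
--         for y in range(w):
--             c = rows[x][y]
--             n = sum(g[x][y] for g in grids)
--             if (c == 'L' and n == 0) or (c == '#' and n >= 5):
--                 out.append((x, y))
--     return out
-- ===== Notes on version B (the rewrite author's own statement) =====
-- stated objective: alternative
-- what changed: Replaces per-seat ray casting (walking each of the 8 rays outward until a seat or the border) by eight linear directional sweeps that propagate the nearest visible seat per direction across the whole grid, then decides every seat from the eight precomputed bits.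
import Mathlib
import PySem

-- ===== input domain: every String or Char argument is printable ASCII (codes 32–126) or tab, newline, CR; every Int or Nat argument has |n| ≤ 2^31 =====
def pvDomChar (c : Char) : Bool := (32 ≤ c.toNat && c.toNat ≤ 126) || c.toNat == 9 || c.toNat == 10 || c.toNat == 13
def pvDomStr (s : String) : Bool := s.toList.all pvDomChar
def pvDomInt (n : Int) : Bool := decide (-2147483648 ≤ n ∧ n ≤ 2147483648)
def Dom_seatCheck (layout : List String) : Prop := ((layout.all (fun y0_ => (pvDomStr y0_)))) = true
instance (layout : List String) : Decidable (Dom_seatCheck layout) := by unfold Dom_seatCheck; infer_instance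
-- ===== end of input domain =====

-- B replaces A's per-seat ray casting by eight linear directional sweeps that propagate the
-- nearest visible seat per direction (an alternative algorithm; no speed claim is made).


-- ===== PORT A =====
def pvOffsets : List (Int × Int) := [(-1,-1),(-1,0),(-1,1),(0,-1),(0,1),(1,-1),(1,0),(1,1)]

def pvMaxW (rows : List (List Char)) : Nat := (rows.map List.length).foldl max 0

-- fuel bound for the Python 'while True' ray walk (the walk always leaves the grid
-- within len(layout) + max row length steps; the fuel is never exhausted)
def pvFuel (layout : List String) : Nat :=
  layout.length + pvMaxW (layout.map String.toList) + 2

-- the 'while True' loop of countAdjacent, step counter i starting at 1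
def pvWalkA (layout : List String) (x y dx dy : Int) : Nat → Int → Bool
  | 0, _ => false
  | f+1, i =>
    let cx := x + i * dx
    let cy := y + i * dy
    if cx < 0 ∨ cy < 0 then false
    else match PySem.List.pyGet? layout cx with
      | none => false
      | some row =>
        match PySem.Str.pyGet? row cy with
        | none => false
        | some c =>
          if c = '#' then true
          else if c = 'L' then false
          else pvWalkA layout x y dx dy f (i+1)

def pvCountAdjacent (layout : List String) (x y : Int) : Int :=
  pvOffsets.foldl (fun filled d =>
    if pvWalkA layout x y d.1 d.2 (pvFuel layout) 1 then filled + 1 else filled) 0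

def seatCheck (layout : List String) : List (Int × Int) :=
  (List.range layout.length).foldl (fun acc x =>
    (List.range (layout.headD "").toList.length).foldl (fun acc y =>
      let c := ((layout.getD x "").toList).getD y ' '
      if c = 'L' ∧ pvCountAdjacent layout (x:Int) (y:Int) = 0 then acc ++ [((x:Int),(y:Int))]
      else if c = '#' ∧ pvCountAdjacent layout (x:Int) (y:Int) ≥ 5 then acc ++ [((x:Int),(y:Int))]
      else acc) acc) []

-- ===== PORT B =====
def pvCombine (c : Char) (inh : Bool) : Bool := (c == '#') || ((c != 'L') && inh)

def pvScanLeft (chars : List Char) : List Bool :=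
  (chars.foldl (fun (st : List Bool × Bool) c => (st.1 ++ [st.2], pvCombine c st.2)) ([], false)).1

def pvShiftVis (w : Nat) (prevChars : List Char) (prevVis : List Bool) (dy : Int) : List Bool :=
  (List.range w).map (fun (yy : Nat) =>
    let ny : Int := (yy : Int) + dy
    if 0 ≤ ny ∧ ny < (prevChars.length : Int) then
      pvCombine (prevChars.getD ny.toNat ' ') (prevVis.getD ny.toNat false)
    else false)

def pvUpSweep (w : Nat) (dy : Int) : List (List Char) → Option (List Char × List Bool) → List (List Bool)
  | [], _ => []
  | chars :: rest, prev =>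
    let vis := match prev with
      | none => List.replicate w false
      | some pv => pvShiftVis w pv.1 pv.2 dy
    vis :: pvUpSweep w dy rest (some (chars, vis))

def seatCheck_alt (layout : List String) : List (Int × Int) :=
  if layout.isEmpty then [] else
  let h := layout.length
  let w := (layout.headD "").toList.length
  let rows := layout.map String.toList
  let W := pvMaxW rows
  let rowsV := rows.reverse
  let grids : List (List (List Bool)) :=
    [ pvUpSweep W (-1) rows none, pvUpSweep W 0 rows none, pvUpSweep W 1 rows none,
      rows.map pvScanLeft,
      rows.map (fun r => (pvScanLeft r.reverse).reverse),
      (pvUpSweep W (-1) rowsV none).reverse, (pvUpSweep W 0 rowsV none).reverse,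
      (pvUpSweep W 1 rowsV none).reverse ]
  (List.range h).foldl (fun acc x =>
    (List.range w).foldl (fun acc y =>
      let c := (rows.getD x []).getD y ' '
      let n : Int := grids.foldl (fun n g => if (g.getD x []).getD y false then n + 1 else n) 0
      if (c = 'L' ∧ n = 0) ∨ (c = '#' ∧ n ≥ 5) then acc ++ [((x:Int),(y:Int))] else acc) acc) []

-- ===== PRECONDITION & SPEC =====
-- Pre_ is exactly A's domain: A (and B) raise IndexError as soon as some row is shorter
-- than the first row, whose length sets the scanned width; on every other input A returns.
def Pre_seatCheck (layout : List String) : Prop :=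
  ∀ s ∈ layout, (layout.headD "").toList.length ≤ s.toList.length
instance (layout : List String) : Decidable (Pre_seatCheck layout) := by
  unfold Pre_seatCheck; infer_instance

def pvWitness_seatCheck : List String := ["L#", ".L"]

def Spec_seatCheck (layout : List String) (out : List (Int × Int)) : Prop := out = seatCheck_alt layout
instance (layout : List String) (out : List (Int × Int)) : Decidable (Spec_seatCheck layout out) := by unfold Spec_seatCheck; infer_instance

-- ===== CLAIM (what is proved, stated in full; the proofs are below) =====
def Claim_equal_seatCheck : Prop := ∀ (layout : List String), Dom_seatCheck layout → Pre_seatCheck layout → Spec_seatCheck layout (seatCheck layout)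


-- ===== LEMMAS AND PROOFS =====

-- ---- proof-side spec: fuel-based ray walk on the char grid ----
def pvCell (rows : List (List Char)) (x y : Int) : Option Char :=
  if x < 0 ∨ y < 0 then none else (rows.getD x.toNat [])[y.toNat]?

def pvV (rows : List (List Char)) (dx dy : Int) : Nat → Int → Int → Bool
  | 0, _, _ => false
  | f+1, x, y =>
    match pvCell rows (x+dx) (y+dy) with
    | none => false
    | some c => if c = '#' then true else if c = 'L' then false else pvV rows dx dy f (x+dx) (y+dy)

lemma pvCell_some {rows : List (List Char)} {x y : Int} {c : Char}
    (h : pvCell rows x y = some c) :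
    0 ≤ x ∧ 0 ≤ y ∧ x.toNat < rows.length ∧ y.toNat < (rows.getD x.toNat []).length ∧
      (rows.getD x.toNat [])[y.toNat]? = some c := by
  unfold pvCell at h
  by_cases hneg : x < 0 ∨ y < 0
  · rw [if_pos hneg] at h; exact absurd h (by simp)
  · rw [if_neg hneg] at h
    have hy : y.toNat < (rows.getD x.toNat []).length := by
      rcases List.getElem?_eq_some_iff.mp h with ⟨hl, _⟩; exact hl
    refine ⟨by omega, by omega, ?_, hy, h⟩
    by_contra hx
    rw [List.getD_eq_default _ _ (by omega)] at hy
    simp at hy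

lemma pvCell_neg_left {rows : List (List Char)} {x y : Int} (h : x < 0) : pvCell rows x y = none := by
  unfold pvCell; simp [h]

-- fuel irrelevance for the upward walk (dx = -1): the walk exits after at most x+1 steps
lemma pvV_fuel_up (rows : List (List Char)) (dy : Int) :
    ∀ f g : Nat, ∀ x y : Int, (x+1).toNat ≤ f → (x+1).toNat ≤ g →
      pvV rows (-1) dy f x y = pvV rows (-1) dy g x y := by
  intro f
  induction f with
  | zero =>
    intro g x y hf hg
    have hx : x ≤ -1 := by omega
    cases g with
    | zero => rfl
    | succ g =>
      show pvV rows (-1) dy 0 x y = pvV rows (-1) dy (g+1) x y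
      rw [show pvV rows (-1) dy (g+1) x y =
        (match pvCell rows (x + -1) (y+dy) with
         | none => false
         | some c => if c = '#' then true else if c = 'L' then false
                     else pvV rows (-1) dy g (x + -1) (y+dy)) from rfl]
      rw [pvCell_neg_left (by omega)]
      rfl
  | succ f ih =>
    intro g x y hf hg
    cases g with
    | zero =>
      have hx : x ≤ -1 := by omega
      show pvV rows (-1) dy (f+1) x y = false
      rw [show pvV rows (-1) dy (f+1) x y =
        (match pvCell rows (x + -1) (y+dy) with
         | none => false
         | some c => if c = '#' then true else if c = 'L' then false
                     else pvV rows (-1) dy f (x + -1) (y+dy)) from rfl]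
      rw [pvCell_neg_left (by omega)]
    | succ g =>
      show pvV rows (-1) dy (f+1) x y = pvV rows (-1) dy (g+1) x y
      rw [show pvV rows (-1) dy (f+1) x y =
        (match pvCell rows (x + -1) (y+dy) with
         | none => false
         | some c => if c = '#' then true else if c = 'L' then false
                     else pvV rows (-1) dy f (x + -1) (y+dy)) from rfl,
        show pvV rows (-1) dy (g+1) x y =
        (match pvCell rows (x + -1) (y+dy) with
         | none => false
         | some c => if c = '#' then true else if c = 'L' then false
                     else pvV rows (-1) dy g (x + -1) (y+dy)) from rfl]
      cases hc : pvCell rows (x + -1) (y+dy) with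
      | none => rfl
      | some c =>
        obtain ⟨h0, -, -, -, -⟩ := pvCell_some hc
        simp only []
        split_ifs with h1 h2
        · rfl
        · rfl
        · exact ih g (x + -1) (y+dy) (by omega) (by omega)

lemma pvV_succ (rows : List (List Char)) (dx dy : Int) (f : Nat) (x y : Int) :
    pvV rows dx dy (f+1) x y =
      (match pvCell rows (x+dx) (y+dy) with
       | none => false
       | some c => if c = '#' then true else if c = 'L' then false
                   else pvV rows dx dy f (x+dx) (y+dy)) := rfl

-- ---- 1D leftward walk inside a single row ----
def pvVL (cs : List Char) : Nat → Int → Bool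
  | 0, _ => false
  | f+1, y =>
    match (if y - 1 < 0 then none else cs[(y-1).toNat]?) with
    | none => false
    | some c => if c = '#' then true else if c = 'L' then false else pvVL cs f (y-1)

lemma pvVL_succ (cs : List Char) (f : Nat) (y : Int) :
    pvVL cs (f+1) y =
      (match (if y - 1 < 0 then none else cs[(y-1).toNat]?) with
       | none => false
       | some c => if c = '#' then true else if c = 'L' then false else pvVL cs f (y-1)) := rfl

lemma pvVL_fuel (cs : List Char) :
    ∀ f g : Nat, ∀ y : Int, (y+1).toNat ≤ f → (y+1).toNat ≤ g → pvVL cs f y = pvVL cs g y := by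
  intro f
  induction f with
  | zero =>
    intro g y hf hg
    cases g with
    | zero => rfl
    | succ g => rw [pvVL_succ, if_pos (by omega : y - 1 < 0)]; rfl
  | succ f ih =>
    intro g y hf hg
    cases g with
    | zero => rw [pvVL_succ, if_pos (by omega : y - 1 < 0)]; rfl
    | succ g =>
      rw [pvVL_succ, pvVL_succ]
      by_cases hy : y - 1 < 0
      · rw [if_pos hy]
      · rw [if_neg hy]
        cases hc : cs[(y-1).toNat]? with
        | none => rfl
        | some c =>
          simp only []
          split_ifs
          · rfl
          · rfl
          · exact ih g (y-1) (by omega) (by omega)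

lemma pvVL_append (cs ds : List Char) :
    ∀ f : Nat, ∀ y : Int, y ≤ (cs.length : Int) → pvVL (cs ++ ds) f y = pvVL cs f y := by
  intro f
  induction f with
  | zero => intro y hy; rfl
  | succ f ih =>
    intro y hy
    rw [pvVL_succ, pvVL_succ]
    by_cases hneg : y - 1 < 0
    · rw [if_pos hneg, if_pos hneg]
    · rw [if_neg hneg, if_neg hneg]
      have hidx : (cs ++ ds)[(y-1).toNat]? = cs[(y-1).toNat]? := by
        rw [List.getElem?_append_left (by omega)]
      rw [hidx]
      cases hc : cs[(y-1).toNat]? with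
      | none => rfl
      | some c =>
        simp only []
        split_ifs
        · rfl
        · rfl
        · exact ih (y-1) (by omega)

-- the horizontal-left 2D walk stays inside its row
lemma pvV_row (rows : List (List Char)) (x : Int) (hx : 0 ≤ x) :
    ∀ f : Nat, ∀ y : Int, pvV rows 0 (-1) f x y = pvVL (rows.getD x.toNat []) f y := by
  intro f
  induction f with
  | zero => intro y; rfl
  | succ f ih =>
    intro y
    rw [pvV_succ, pvVL_succ]
    have hx0 : x + 0 = x := by ring
    have hcell : pvCell rows (x+0) (y + -1) =
        (if y - 1 < 0 then none else (rows.getD x.toNat [])[(y-1).toNat]?) := by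
      unfold pvCell
      by_cases hneg : y - 1 < 0
      · rw [if_pos (by omega : x + 0 < 0 ∨ y + -1 < 0), if_pos hneg]
      · rw [if_neg (by omega : ¬(x + 0 < 0 ∨ y + -1 < 0)), if_neg hneg]
        rw [show x + 0 = x from by ring, show y + -1 = y - 1 from by ring]
    rw [hcell]
    cases hc : (if y - 1 < 0 then none else (rows.getD x.toNat [])[(y-1).toNat]?) with
    | none => rfl
    | some c =>
      simp only []
      split_ifs
      · rfl
      · rfl
      · rw [show x + 0 = x from by ring, show y + -1 = y - 1 from by ring]
        exact ih (y-1)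

-- ---- the scan_left fold computes the 1D walk at every position ----
lemma scanPair_spec (cs : List Char) :
    cs.foldl (fun (st : List Bool × Bool) c => (st.1 ++ [st.2], pvCombine c st.2)) ([], false)
      = ((List.range cs.length).map (fun y => pvVL cs (y+1) (y:Int)),
         pvVL cs (cs.length+1) (cs.length : Int)) := by
  induction cs using List.reverseRecOn with
  | nil =>
    simp only [List.foldl_nil, List.length_nil, List.range_zero, List.map_nil]
    rfl
  | append_singleton cs c ih =>
    rw [List.foldl_append, ih]
    simp only [List.foldl_cons, List.foldl_nil, List.length_append, List.length_cons,
      List.length_nil]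
    simp only [Nat.zero_add, Prod.mk.injEq]
    constructor
    · -- first component
      rw [List.range_succ, List.map_append]
      congr 1
      · apply List.map_congr_left
        intro y hy
        have hy' : y < cs.length := List.mem_range.mp hy
        exact (pvVL_append cs [c] (y+1) y (by exact_mod_cast Nat.le_of_lt hy')).symm
      · simp only [List.map_cons, List.map_nil]
        rw [pvVL_append cs [c] (cs.length+1) (cs.length : Int) (by omega)]
    · -- second component
      have hstep : pvVL (cs ++ [c]) (cs.length+1+1) ((cs.length : Int)+1)
          = pvCombine c (pvVL cs (cs.length+1) (cs.length : Int)) := by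
        rw [pvVL_succ]
        have hneg : ¬((cs.length : Int) + 1 - 1 < 0) := by omega
        rw [if_neg hneg]
        have hidx : (cs ++ [c])[(((cs.length : Int) + 1 - 1)).toNat]? = some c := by
          have : (((cs.length : Int) + 1 - 1)).toNat = cs.length := by omega
          rw [this]
          simp
        rw [hidx]
        have harg : pvVL (cs ++ [c]) (cs.length+1) ((cs.length : Int))
            = pvVL cs (cs.length+1) (cs.length : Int) :=
          pvVL_append cs [c] (cs.length+1) (cs.length : Int) (by omega)
        simp only [show (cs.length : Int) + 1 - 1 = (cs.length : Int) from by ring]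
        unfold pvCombine
        by_cases h1 : c = '#'
        · simp [h1]
        · by_cases h2 : c = 'L'
          · simp [h2]
          · simp only [harg]
            have a1 : (c == '#') = false := by simp [h1]
            have a2 : (c != 'L') = true := by simp [h2]
            rw [a1, a2, Bool.true_and, Bool.false_or, if_neg h1, if_neg h2]
      rw [show ((cs.length : Int) + 1) = (((cs.length+1 : Nat)) : Int) from by push_cast; ring] at hstep
      exact hstep.symm ▸ rfl

lemma scanLeft_spec (cs : List Char) :
    pvScanLeft cs = (List.range cs.length).map (fun y => pvVL cs (y+1) (y:Int)) := by
  unfold pvScanLeft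
  rw [scanPair_spec]

-- ---- grid flips: walking down = walking up the reversed grid, right = left on reversed rows ----
lemma pvCell_reverse (rows : List (List Char)) (a y : Int) :
    pvCell rows.reverse ((rows.length : Int) - 1 - a) y = pvCell rows a y := by
  unfold pvCell
  by_cases hy : y < 0
  · rw [if_pos (by omega : (rows.length : Int) - 1 - a < 0 ∨ y < 0),
      if_pos (by omega : a < 0 ∨ y < 0)]
  · by_cases ha : 0 ≤ a ∧ a < (rows.length : Int)
    · rw [if_neg (by omega : ¬((rows.length : Int) - 1 - a < 0 ∨ y < 0)),
        if_neg (by omega : ¬(a < 0 ∨ y < 0))]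
      have h1 : ((rows.length : Int) - 1 - a).toNat < rows.reverse.length := by
        simp; omega
      have h2 : a.toNat < rows.length := by omega
      rw [List.getD_eq_getElem _ _ h1, List.getD_eq_getElem _ _ h2, List.getElem_reverse]
      congr 2
      simp at h1 ⊢
      omega
    · -- a out of vertical range: both sides are none
      by_cases ha2 : a < 0
      · rw [if_pos (by omega : a < 0 ∨ y < 0)]
        rw [if_neg (by omega : ¬((rows.length : Int) - 1 - a < 0 ∨ y < 0))]
        rw [List.getD_eq_default _ _ (by simp; omega)]
        simp
      · -- a ≥ rows.length
        rw [if_pos (by omega : (rows.length : Int) - 1 - a < 0 ∨ y < 0)]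
        rw [if_neg (by omega : ¬(a < 0 ∨ y < 0))]
        rw [List.getD_eq_default _ _ (by omega)]
        simp

lemma pvV_vflip (rows : List (List Char)) (dy : Int) :
    ∀ f : Nat, ∀ x y : Int,
      pvV rows 1 dy f x y = pvV rows.reverse (-1) dy f ((rows.length : Int) - 1 - x) y := by
  intro f
  induction f with
  | zero => intro x y; rfl
  | succ f ih =>
    intro x y
    rw [pvV_succ, pvV_succ]
    have hcell : pvCell rows.reverse ((rows.length : Int) - 1 - x + -1) (y+dy)
        = pvCell rows (x+1) (y+dy) := by
      rw [show (rows.length : Int) - 1 - x + -1 = (rows.length : Int) - 1 - (x+1) from by ring]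
      exact pvCell_reverse rows (x+1) (y+dy)
    rw [hcell]
    cases hc : pvCell rows (x+1) (y+dy) with
    | none => rfl
    | some c =>
      simp only []
      split_ifs
      · rfl
      · rfl
      · rw [ih (x+1) (y+dy)]
        congr 1
        ring
-- the horizontal-right 2D walk is the leftward 1D walk on the reversed row
lemma pvV_rowR (rows : List (List Char)) (x : Int) (hx : 0 ≤ x) :
    ∀ f : Nat, ∀ y : Int,
      pvV rows 0 1 f x y
        = pvVL (rows.getD x.toNat []).reverse f (((rows.getD x.toNat []).length : Int) - 1 - y) := by
  intro f
  induction f with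
  | zero => intro y; rfl
  | succ f ih =>
    intro y
    rw [pvV_succ, pvVL_succ]
    set r := rows.getD x.toNat [] with hr
    have hcell : pvCell rows (x+0) (y+1)
        = (if ((r.length : Int) - 1 - y) - 1 < 0 then none
           else r.reverse[(((r.length : Int) - 1 - y) - 1).toNat]?) := by
      unfold pvCell
      by_cases hcase : 0 ≤ y + 1 ∧ y + 1 < (r.length : Int)
      · rw [if_neg (by omega : ¬(x + 0 < 0 ∨ y + 1 < 0)),
          if_neg (by omega : ¬((r.length : Int) - 1 - y - 1 < 0))]
        rw [show (x+0).toNat = x.toNat from by omega, ← hr]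
        rw [List.getElem?_eq_getElem (by omega : (y+1).toNat < r.length),
          List.getElem?_eq_getElem (by simp; omega :
            ((r.length : Int) - 1 - y - 1).toNat < r.reverse.length),
          List.getElem_reverse]
        have hidx : r.length - 1 - ((r.length : Int) - 1 - y - 1).toNat = (y+1).toNat := by
          omega
        simp only [hidx]
      · -- out of range on both sides
        by_cases hneg : y + 1 < 0
        · rw [if_pos (by omega : x + 0 < 0 ∨ y + 1 < 0),
            if_neg (by omega : ¬((r.length : Int) - 1 - y - 1 < 0))]
          symm
          apply List.getElem?_eq_none
          simp
          omega
        · -- y + 1 ≥ r.length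
          rw [if_neg (by omega : ¬(x + 0 < 0 ∨ y + 1 < 0)),
            if_pos (by omega : (r.length : Int) - 1 - y - 1 < 0)]
          rw [show (x+0).toNat = x.toNat from by omega, ← hr]
          apply List.getElem?_eq_none
          omega
    rw [hcell]
    cases hc : (if ((r.length : Int) - 1 - y) - 1 < 0 then none
        else r.reverse[(((r.length : Int) - 1 - y) - 1).toNat]?) with
    | none => rfl
    | some c =>
      simp only []
      split_ifs
      · rfl
      · rfl
      · rw [show x + 0 = x from by ring, ih (y+1)]
        congr 1
        ring

lemma getD_map_range {β : Type} (f : Nat → β) (n k : Nat) (hk : k < n) (d : β) :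
    ((List.range n).map f).getD k d = f k := by
  rw [List.getD_eq_getElem _ _ (by simpa using hk)]
  simp

def pvSpecRow (rows : List (List Char)) (dy : Int) (w F : Nat) (k : Nat) : List Bool :=
  (List.range w).map (fun (y : Nat) => pvV rows (-1) dy F (k : Int) (y : Int))

lemma specRow_zero (rows : List (List Char)) (dy : Int) (w F : Nat) :
    pvSpecRow rows dy w F 0 = List.replicate w false := by
  unfold pvSpecRow
  have h : ∀ y : Nat, pvV rows (-1) dy F (((0:Nat) : Nat) : Int) (y : Int) = false := by
    intro y
    cases F with
    | zero => rfl
    | succ F =>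
      rw [pvV_succ, show ((0:Nat) : Int) + -1 = -1 from by norm_num,
        pvCell_neg_left (by norm_num)]
  simp only [h]
  simp [List.map_const']

lemma shift_spec (rows : List (List Char)) (dy : Int) (w F : Nat)
    (hW : ∀ r ∈ rows, r.length ≤ w)
    (k : Nat) (hk : k + 1 ≤ rows.length) (hF : rows.length + w + 2 ≤ F) :
    pvShiftVis w (rows.getD k []) (pvSpecRow rows dy w F k) dy = pvSpecRow rows dy w F (k+1) := by
  unfold pvShiftVis pvSpecRow
  apply List.map_congr_left
  intro y hy
  have hyw : (y : Nat) < w := List.mem_range.mp hy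
  obtain ⟨F', rfl⟩ : ∃ F', F = F' + 1 := ⟨F - 1, by omega⟩
  rw [pvV_succ, show (((k+1 : Nat)) : Int) + -1 = (k : Int) from by push_cast; ring]
  have hlen : (rows.getD k []).length ≤ w := by
    rw [List.getD_eq_getElem _ _ (by omega)]
    exact hW _ (List.getElem_mem (by omega))
  by_cases h0 : 0 ≤ (y : Int) + dy ∧ (y : Int) + dy < ((rows.getD k []).length : Int)
  · rw [if_pos h0]
    set ny : Int := (y : Int) + dy with hny
    have hnyw : ny.toNat < w := by omega
    have hcell : pvCell rows (k : Int) ny = some ((rows.getD k []).getD ny.toNat ' ') := by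
      unfold pvCell
      rw [if_neg (by omega : ¬((k : Int) < 0 ∨ ny < 0))]
      rw [show ((k : Int)).toNat = k from by omega]
      rw [List.getElem?_eq_getElem (by omega : ny.toNat < (rows.getD k []).length)]
      exact congrArg some (List.getD_eq_getElem _ _ (by omega)).symm
    rw [hcell]
    set c := (rows.getD k []).getD ny.toNat ' ' with hc
    simp only []
    unfold pvCombine
    by_cases h1 : c = '#'
    · simp [h1]
    · by_cases h2 : c = 'L'
      · simp [h2]
      · have a1 : (c == '#') = false := by simp [h1]
        have a2 : (c != 'L') = true := by simp [h2]
        rw [if_neg h1, if_neg h2, a1, a2, Bool.true_and, Bool.false_or,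
          getD_map_range (fun (y : Nat) => pvV rows (-1) dy (F'+1) (k : Int) (y : Int))
            w ny.toNat hnyw false,
          show ((ny.toNat : Nat) : Int) = ny from by omega]
        exact pvV_fuel_up rows dy (F'+1) F' (k : Int) ny (by omega) (by omega)
  · rw [if_neg h0]
    by_cases hneg : (y : Int) + dy < 0
    · rw [show pvCell rows (k : Int) ((y : Int) + dy) = none from by
        unfold pvCell; rw [if_pos (by omega : (k : Int) < 0 ∨ (y : Int) + dy < 0)]]
    · have hge : ((rows.getD k []).length : Int) ≤ (y : Int) + dy := by omega
      rw [show pvCell rows (k : Int) ((y : Int) + dy) = none from by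
        unfold pvCell
        rw [if_neg (by omega : ¬((k : Int) < 0 ∨ (y : Int) + dy < 0))]
        apply List.getElem?_eq_none
        rw [show ((k : Int)).toNat = k from by omega]
        omega]

def pvPrev (rows : List (List Char)) (dy : Int) (w F : Nat) : Nat → Option (List Char × List Bool)
  | 0 => none
  | Nat.succ j => some (rows.getD j [], pvSpecRow rows dy w F j)

lemma pvUpSweep_cons (w : Nat) (dy : Int) (chars : List Char) (rest : List (List Char))
    (prev : Option (List Char × List Bool)) :
    pvUpSweep w dy (chars :: rest) prev =
      (let vis := match prev with
        | none => List.replicate w false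
        | some pv => pvShiftVis w pv.1 pv.2 dy
       vis :: pvUpSweep w dy rest (some (chars, vis))) := rfl

lemma upSweep_go (rows : List (List Char)) (dy : Int) (w F : Nat)
    (hW : ∀ r ∈ rows, r.length ≤ w) (hF : rows.length + w + 2 ≤ F) :
    ∀ n k : Nat, k + n = rows.length →
      pvUpSweep w dy (rows.drop k) (pvPrev rows dy w F k)
        = (List.range n).map (fun j => pvSpecRow rows dy w F (k+j)) := by
  intro n
  induction n with
  | zero =>
    intro k hk
    rw [List.drop_of_length_le (by omega)]
    rfl
  | succ n ih =>
    intro k hk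
    have hklt : k < rows.length := by omega
    rw [List.drop_eq_getElem_cons hklt, pvUpSweep_cons]
    have hvis : (match pvPrev rows dy w F k with
        | none => List.replicate w false
        | some pv => pvShiftVis w pv.1 pv.2 dy) = pvSpecRow rows dy w F k := by
      cases k with
      | zero => exact (specRow_zero rows dy w F).symm
      | succ j =>
        show pvShiftVis w (rows.getD j []) (pvSpecRow rows dy w F j) dy = _
        exact shift_spec rows dy w F hW j (by omega) hF
    simp only [hvis]
    have hprev : some (rows[k], pvSpecRow rows dy w F k) = pvPrev rows dy w F (k+1) := by
      show _ = some (rows.getD k [], pvSpecRow rows dy w F k)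
      rw [List.getD_eq_getElem _ _ hklt]
    rw [hprev, ih (k+1) (by omega)]
    rw [List.range_succ_eq_map, List.map_cons, List.map_map]
    refine congrArg₂ List.cons ?_ ?_
    · rfl
    · apply List.map_congr_left
      intro j _
      show pvSpecRow rows dy w F (k+1+j) = pvSpecRow rows dy w F (k + j.succ)
      congr 1
      omega

lemma grid_up (rows : List (List Char)) (dy : Int) (w F : Nat)
    (hW : ∀ r ∈ rows, r.length ≤ w) (hF : rows.length + w + 2 ≤ F) :
    pvUpSweep w dy rows none
      = (List.range rows.length).map (fun x => pvSpecRow rows dy w F x) := by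
  have := upSweep_go rows dy w F hW hF rows.length 0 (by omega)
  simpa using this
-- ---- A's while-loop walk equals the fuel walk on the char grid ----
lemma pvWalkA_succ (layout : List String) (x y dx dy : Int) (f : Nat) (i : Int) :
    pvWalkA layout x y dx dy (f+1) i =
      (if x + i * dx < 0 ∨ y + i * dy < 0 then false
       else match PySem.List.pyGet? layout (x + i * dx) with
         | none => false
         | some row =>
           match PySem.Str.pyGet? row (y + i * dy) with
           | none => false
           | some c =>
             if c = '#' then true
             else if c = 'L' then false
             else pvWalkA layout x y dx dy f (i+1)) := rfl

lemma cell_eq_chain (layout : List String) (cx cy : Int) :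
    pvCell (layout.map String.toList) cx cy =
      (if cx < 0 ∨ cy < 0 then none
       else match PySem.List.pyGet? layout cx with
         | none => none
         | some row => PySem.Str.pyGet? row cy) := by
  unfold pvCell
  by_cases hneg : cx < 0 ∨ cy < 0
  · rw [if_pos hneg, if_pos hneg]
  · rw [if_neg hneg, if_neg hneg]
    have h0 : (0:Int) ≤ cx := by omega
    rw [PySem.List.pyGet?_of_nonneg layout h0]
    cases hx : layout[cx.toNat]? with
    | none =>
      have hlen : layout.length ≤ cx.toNat := by
        exact List.getElem?_eq_none_iff.mp hx
      have : (layout.map String.toList).getD cx.toNat [] = [] :=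
        List.getD_eq_default _ _ (by simpa using hlen)
      rw [this]
      simp
    | some row =>
      have hlt : cx.toNat < layout.length := by
        rcases List.getElem?_eq_some_iff.mp hx with ⟨h, _⟩; exact h
      have hrow : (layout.map String.toList).getD cx.toNat [] = row.toList := by
        rw [List.getD_eq_getElem _ _ (by simpa using hlt), List.getElem_map]
        congr 1
        have := List.getElem?_eq_some_iff.mp hx
        rcases this with ⟨h, he⟩
        exact he
      rw [hrow]
      show row.toList[cy.toNat]? = PySem.Str.pyGet? row cy
      rw [show PySem.Str.pyGet? row cy = PySem.List.pyGet? row.toList cy from by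
        simp [PySem.Str.pyGet?]]
      rw [PySem.List.pyGet?_of_nonneg _ (by omega : (0:Int) ≤ cy)]

lemma walkA_eq_V (layout : List String) (dx dy : Int) :
    ∀ f : Nat, ∀ x y i : Int,
      pvWalkA layout x y dx dy f i
        = pvV (layout.map String.toList) dx dy f (x + (i-1)*dx) (y + (i-1)*dy) := by
  intro f
  induction f with
  | zero => intro x y i; rfl
  | succ f ih =>
    intro x y i
    rw [pvWalkA_succ, pvV_succ,
      show x + (i-1)*dx + dx = x + i*dx from by ring,
      show y + (i-1)*dy + dy = y + i*dy from by ring,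
      cell_eq_chain layout (x + i*dx) (y + i*dy)]
    by_cases hneg : x + i*dx < 0 ∨ y + i*dy < 0
    · rw [if_pos hneg, if_pos hneg]
    · rw [if_neg hneg, if_neg hneg]
      cases hx : PySem.List.pyGet? layout (x + i*dx) with
      | none => rfl
      | some row =>
        simp only []
        cases hy : PySem.Str.pyGet? row (y + i*dy) with
        | none => rfl
        | some c =>
          simp only []
          split_ifs
          · rfl
          · rfl
          · rw [ih x y (i+1),
              show x + (i+1-1)*dx = x + i*dx from by ring,
              show y + (i+1-1)*dy = y + i*dy from by ring]

lemma walkA_one (layout : List String) (dx dy : Int) (f : Nat) (x y : Int) :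
    pvWalkA layout x y dx dy f 1 = pvV (layout.map String.toList) dx dy f x y := by
  rw [walkA_eq_V layout dx dy f x y 1]
  norm_num
-- ---- reading one cell out of each of the eight precomputed grids ----
lemma getD_reverse {α : Type} (l : List α) (i : Nat) (hi : i < l.length) (d : α) :
    l.reverse.getD i d = l.getD (l.length - 1 - i) d := by
  rw [List.getD_eq_getElem _ _ (by simpa), List.getElem_reverse,
    List.getD_eq_getElem _ _ (by omega)]

lemma getD_map {α β : Type} (f : α → β) (l : List α) (x : Nat) (hx : x < l.length)
    (d : β) (d' : α) : (l.map f).getD x d = f (l.getD x d') := by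
  rw [List.getD_eq_getElem _ _ (by simpa), List.getElem_map, List.getD_eq_getElem _ _ hx]

lemma up_val (rows : List (List Char)) (dy : Int) (w F : Nat)
    (hW : ∀ r ∈ rows, r.length ≤ w)
    (hF : rows.length + w + 2 ≤ F) (x y : Nat) (hx : x < rows.length) (hy : y < w) :
    ((pvUpSweep w dy rows none).getD x []).getD y false = pvV rows (-1) dy F (x : Int) (y : Int) := by
  rw [grid_up rows dy w F hW hF,
    getD_map_range (fun x => pvSpecRow rows dy w F x) _ x hx []]
  unfold pvSpecRow
  rw [getD_map_range _ _ y hy false]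

lemma down_val (rows : List (List Char)) (dy : Int) (w F : Nat)
    (hW : ∀ r ∈ rows, r.length ≤ w)
    (hF : rows.length + w + 2 ≤ F) (x y : Nat) (hx : x < rows.length) (hy : y < w) :
    ((pvUpSweep w dy rows.reverse none).reverse.getD x []).getD y false
      = pvV rows 1 dy F (x : Int) (y : Int) := by
  have hWR : ∀ r ∈ rows.reverse, r.length ≤ w := fun r hr => hW r (List.mem_reverse.mp hr)
  have hgrid := grid_up rows.reverse dy w F hWR (by simpa using hF)
  have hlen : (pvUpSweep w dy rows.reverse none).length = rows.length := by
    rw [hgrid]; simp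
  rw [getD_reverse _ x (by omega) [], hlen, hgrid]
  have hx' : rows.length - 1 - x < rows.reverse.length := by simp; omega
  rw [getD_map_range (fun x => pvSpecRow rows.reverse dy w F x) _ (rows.length - 1 - x)
    (by simpa using hx') []]
  unfold pvSpecRow
  rw [getD_map_range _ _ y hy false]
  rw [pvV_vflip rows dy F (x : Int) (y : Int)]
  congr 1
  omega

lemma left_val (rows : List (List Char)) (F : Nat)
    (x y : Nat) (hx : x < rows.length) (hy : y < (rows.getD x []).length)
    (hyF : y + 1 ≤ F) :
    ((rows.map pvScanLeft).getD x []).getD y false = pvV rows 0 (-1) F (x : Int) (y : Int) := by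
  rw [getD_map pvScanLeft rows x hx [] []]
  rw [scanLeft_spec, getD_map_range _ _ y hy false]
  rw [pvV_row rows (x : Int) (by omega) F (y : Int),
    show ((x : Int)).toNat = x from by omega]
  exact pvVL_fuel _ (y+1) F (y : Int) (by omega) (by omega)

lemma right_val (rows : List (List Char)) (F : Nat)
    (x y : Nat) (hx : x < rows.length) (hy : y < (rows.getD x []).length)
    (hlenF : (rows.getD x []).length ≤ F) :
    ((rows.map (fun r => (pvScanLeft r.reverse).reverse)).getD x []).getD y false
      = pvV rows 0 1 F (x : Int) (y : Int) := by
  rw [getD_map (fun r => (pvScanLeft r.reverse).reverse) rows x hx [] []]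
  set r := rows.getD x [] with hr
  have hlenS : (pvScanLeft r.reverse).length = r.length := by
    rw [scanLeft_spec, List.length_map, List.length_range, List.length_reverse]
  rw [getD_reverse _ y (by omega) false, hlenS, scanLeft_spec, List.length_reverse,
    getD_map_range _ _ (r.length - 1 - y) (by omega) false]
  rw [pvV_rowR rows (x : Int) (by omega) F (y : Int),
    show ((x : Int)).toNat = x from by omega, ← hr]
  rw [show ((r.length : Int) - 1 - (y : Int)) = ((r.length - 1 - y : Nat) : Int) from by omega]
  exact pvVL_fuel _ (r.length - 1 - y + 1) F ((r.length - 1 - y : Nat) : Int)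
    (by omega) (by omega)

lemma branch_eq {α : Type} (c : Char) (n : Int) (acc : List α) (v : α) :
    (if c = 'L' ∧ n = 0 then acc ++ [v] else if c = '#' ∧ n ≥ 5 then acc ++ [v] else acc)
      = (if (c = 'L' ∧ n = 0) ∨ (c = '#' ∧ n ≥ 5) then acc ++ [v] else acc) := by
  by_cases h1 : c = 'L' ∧ n = 0
  · rw [if_pos h1, if_pos (Or.inl h1)]
  · rw [if_neg h1]
    by_cases h2 : c = '#' ∧ n ≥ 5
    · rw [if_pos h2, if_pos (Or.inr h2)]
    · rw [if_neg h2, if_neg (by tauto)]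

lemma foldl_max_init : ∀ (l : List Nat) (a : Nat), a ≤ l.foldl max a := by
  intro l
  induction l with
  | nil => intro a; simp
  | cons b t ih =>
    intro a
    simp only [List.foldl_cons]
    exact le_trans (le_max_left a b) (ih (max a b))

lemma foldl_max_mem : ∀ (l : List Nat) (a : Nat), ∀ x ∈ l, x ≤ l.foldl max a := by
  intro l
  induction l with
  | nil => intro a x hx; simp at hx
  | cons b t ih =>
    intro a x hx
    rcases List.mem_cons.mp hx with h | h
    · subst h
      simp only [List.foldl_cons]
      exact le_trans (le_max_right a x) (foldl_max_init t _)
    · exact ih (max a b) x h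

lemma le_pvMaxW (rows : List (List Char)) (r : List Char) (hr : r ∈ rows) :
    r.length ≤ pvMaxW rows :=
  foldl_max_mem _ 0 _ (List.mem_map.mpr ⟨r, hr, rfl⟩)

lemma headD_mem {α : Type} (l : List α) (d : α) (h : l ≠ []) : l.headD d ∈ l := by
  cases l with
  | nil => exact absurd rfl h
  | cons a t => simp

lemma getD_mem {α : Type} (l : List α) (x : Nat) (hx : x < l.length) (d : α) :
    l.getD x d ∈ l := by
  rw [List.getD_eq_getElem _ _ hx]
  exact List.getElem_mem hx

set_option maxHeartbeats 2000000 in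
lemma bcount_eq (layout : List String)
    (hpre : ∀ s ∈ layout, (layout.headD "").toList.length ≤ s.toList.length)
    (x y : Nat) (hx : x < layout.length) (hy : y < (layout.headD "").toList.length) :
    ([ pvUpSweep (pvMaxW (layout.map String.toList)) (-1) (layout.map String.toList) none,
       pvUpSweep (pvMaxW (layout.map String.toList)) 0 (layout.map String.toList) none,
       pvUpSweep (pvMaxW (layout.map String.toList)) 1 (layout.map String.toList) none,
       (layout.map String.toList).map pvScanLeft,
       (layout.map String.toList).map (fun r => (pvScanLeft r.reverse).reverse),
       (pvUpSweep (pvMaxW (layout.map String.toList)) (-1) (layout.map String.toList).reverse none).reverse,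
       (pvUpSweep (pvMaxW (layout.map String.toList)) 0 (layout.map String.toList).reverse none).reverse,
       (pvUpSweep (pvMaxW (layout.map String.toList)) 1 (layout.map String.toList).reverse none).reverse
     ]).foldl (fun n g => if (g.getD x []).getD y false then n + 1 else n) (0:Int)
      = pvCountAdjacent layout (x : Int) (y : Int) := by
  have hx' : x < (layout.map String.toList).length := by simpa using hx
  have hW : ∀ r ∈ layout.map String.toList, r.length ≤ pvMaxW (layout.map String.toList) :=
    fun r hr => le_pvMaxW _ r hr
  have hFle : (layout.map String.toList).length + pvMaxW (layout.map String.toList) + 2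
      ≤ pvFuel layout := by simp [pvFuel]
  have hne : layout ≠ [] := by
    intro h; subst h; simp at hx
  have hw0 : (layout.headD "").toList.length ≤ pvMaxW (layout.map String.toList) :=
    le_pvMaxW _ _ (List.mem_map.mpr ⟨layout.headD "", headD_mem layout "" hne, rfl⟩)
  have hyW : y < pvMaxW (layout.map String.toList) := by omega
  have hrowx : ((layout.map String.toList).getD x []) = (layout.getD x "").toList :=
    getD_map String.toList layout x hx [] ""
  have hylen : y < ((layout.map String.toList).getD x []).length := by
    rw [hrowx]
    exact lt_of_lt_of_le hy (hpre _ (getD_mem layout x hx ""))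
  have hlenF : ((layout.map String.toList).getD x []).length ≤ pvFuel layout := by
    have h1 : ((layout.map String.toList).getD x []).length
        ≤ pvMaxW (layout.map String.toList) :=
      le_pvMaxW _ _ (getD_mem (layout.map String.toList) x hx' [])
    have h2 : pvFuel layout
        = layout.length + pvMaxW (layout.map String.toList) + 2 := rfl
    omega
  have hyF : y + 1 ≤ pvFuel layout := by
    have h2 : pvFuel layout
        = layout.length + pvMaxW (layout.map String.toList) + 2 := rfl
    omega
  simp only [List.foldl_cons, List.foldl_nil]
  rw [up_val (layout.map String.toList) (-1) _ (pvFuel layout) hW hFle x y hx' hyW,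
    up_val (layout.map String.toList) 0 _ (pvFuel layout) hW hFle x y hx' hyW,
    up_val (layout.map String.toList) 1 _ (pvFuel layout) hW hFle x y hx' hyW,
    left_val (layout.map String.toList) (pvFuel layout) x y hx' hylen hyF,
    right_val (layout.map String.toList) (pvFuel layout) x y hx' hylen hlenF,
    down_val (layout.map String.toList) (-1) _ (pvFuel layout) hW hFle x y hx' hyW,
    down_val (layout.map String.toList) 0 _ (pvFuel layout) hW hFle x y hx' hyW,
    down_val (layout.map String.toList) 1 _ (pvFuel layout) hW hFle x y hx' hyW]
  simp only [pvCountAdjacent, pvOffsets, List.foldl_cons, List.foldl_nil]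
  simp only [walkA_one]

-- ===== VERDICT (by name: the statement is the Claim_ definition above) =====
set_option maxHeartbeats 2000000 in
theorem seatCheck_spec : Claim_equal_seatCheck := by
  intro layout _ hpre
  unfold Spec_seatCheck
  by_cases hemp : layout = []
  · subst hemp; rfl
  · unfold seatCheck seatCheck_alt
    rw [if_neg (by simpa using hemp)]
    apply PySem.List.foldl_congr_mem
    intro acc x hxmem
    have hx : x < layout.length := List.mem_range.mp hxmem
    apply PySem.List.foldl_congr_mem
    intro acc2 y hymem
    have hy : y < (layout.headD "").toList.length := List.mem_range.mp hymem
    rw [show ((layout.map String.toList).getD x []).getD y ' '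
        = ((layout.getD x "").toList).getD y ' ' from by
      rw [getD_map String.toList layout x hx [] ""]]
    rw [bcount_eq layout hpre x y hx hy]
    exact branch_eq _ _ _ _
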